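-- pv_equiv track=rewrite | github.com/birdass/Palgad-Delija- | Palgad(Delija)/Palgad_Delija_.py | maksimum
-- ===== SOURCE A (Python) =====
-- def maksimum(palk,inimesed):
--     m_palgad=[]
--     nimed=[]
--     max_palk=palk[0]
--     kellel=inimesed[0]
--     for p in palk:
--         if p>max_palk:
--             max_palk=p
--             i=palk.index(max_palk)
--             kellel=inimesed[i]
--     n=palk.count(max_palk)
--     palk_copy=palk.copy()
--     inimesed_copy=inimesed.copy()
--     for i in range(n):
--         j=palk_copy.index(max_palk)
--         m_palgad.append(palk_copy.pop(j))
--         nimed.append(inimesed_copy.pop(j))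
--     return m_palgad, nimed
-- ===== SOURCE B (Python) =====
-- def maksimum(palk, inimesed):
--     max_palk = palk[0]
--     groups = {}
--     for p, nimi in zip(palk, inimesed):
--         if p > max_palk:
--             max_palk = p
--         groups.setdefault(p, []).append(nimi)
--     nimed = groups[max_palk]
--     return [max_palk] * len(nimed), nimed
-- ===== Notes on version B (the rewrite author's own statement) =====
-- stated objective: faster
-- what changed: B makes one pass over zip(palk, inimesed) grouping names by salary in a dict while tracking the running maximum, then returns the group for the maximum; A's max-scan with repeated list.index plus an n-round index/pop extraction loop disappears.
import Mathlib
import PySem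

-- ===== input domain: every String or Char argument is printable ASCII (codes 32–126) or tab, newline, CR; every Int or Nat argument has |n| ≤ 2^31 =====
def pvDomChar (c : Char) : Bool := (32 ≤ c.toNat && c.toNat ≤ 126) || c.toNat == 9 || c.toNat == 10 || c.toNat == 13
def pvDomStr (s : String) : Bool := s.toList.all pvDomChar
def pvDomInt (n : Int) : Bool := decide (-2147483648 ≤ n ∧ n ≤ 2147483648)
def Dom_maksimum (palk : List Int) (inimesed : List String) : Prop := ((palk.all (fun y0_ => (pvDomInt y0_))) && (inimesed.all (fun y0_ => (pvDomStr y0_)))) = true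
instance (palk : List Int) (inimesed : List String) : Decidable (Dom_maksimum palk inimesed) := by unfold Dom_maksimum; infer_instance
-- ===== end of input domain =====

-- B groups names by salary in a dict during one pass over zip(palk, inimesed) while tracking the
-- running maximum, replacing A's repeated list.index/pop extraction; O(n) instead of A's quadratic scans (objective: faster).

-- ===== PORT A =====
-- the second for-loop of A: pop the first occurrence of max_palk from both copies, n times
def maksimumPop (m : Int) : Nat → List Int → List String → List Int → List String → List Int × List String
  | 0, _, _, acc1, acc2 => (acc1, acc2)
  | Nat.succ k, pc, ic, acc1, acc2 =>
    let j : Nat := (PySem.List.index? pc m).getD 0   -- ValueError impossible: m occurs in pc at this point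
    let p1 := (PySem.List.pop? pc (j : Int)).getD (0, pc)       -- palk_copy.pop(j)
    let p2 := (PySem.List.pop? ic (j : Int)).getD ("", ic)      -- inimesed_copy.pop(j); IndexError excluded by Pre_
    maksimumPop m k p1.2 p2.2 (acc1 ++ [p1.1]) (acc2 ++ [p2.1])

def maksimum (palk : List Int) (inimesed : List String) : List Int × List String :=
  let max_palk0 := PySem.List.pyGetD palk 0 0          -- palk[0]; IndexError on [] excluded by Pre_
  let kellel0 := PySem.List.pyGetD inimesed 0 ""       -- inimesed[0]; IndexError on [] excluded by Pre_
  let st := palk.foldl (fun (st : Int × String) p =>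
      if p > st.1 then
        let i : Nat := (PySem.List.index? palk p).getD 0
        (p, PySem.List.pyGetD inimesed (i : Int) "")   -- inimesed[i]; IndexError excluded by Pre_
      else st) (max_palk0, kellel0)
  let n := PySem.List.count palk st.1
  maksimumPop st.1 n palk inimesed [] []

-- ===== PORT B =====
def maksimum_alt (palk : List Int) (inimesed : List String) : List Int × List String :=
  let max0 := PySem.List.pyGetD palk 0 0               -- palk[0]; IndexError on [] excluded by Pre_
  let st := (palk.zip inimesed).foldl
      (fun (st : Int × PySem.Dict Int (List String)) pn =>
        ((if pn.1 > st.1 then pn.1 else st.1),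
         st.2.modify pn.1 [] (fun l => l ++ [pn.2])))  -- groups.setdefault(p, []).append(nimi)
      (max0, PySem.Dict.empty)
  let nimed := st.2.getD st.1 []                       -- groups[max_palk]; KeyError excluded by Pre_
  (List.replicate nimed.length st.1, nimed)

-- ===== PRECONDITION & SPEC =====
-- Pre_ = exactly the inputs where A returns: both lists nonempty and every index at which palk
-- attains its maximum is a valid index of inimesed (otherwise A raises IndexError).
def Pre_maksimum (palk : List Int) (inimesed : List String) : Prop :=
  palk ≠ [] ∧ inimesed ≠ [] ∧
  ∀ i : Nat, i < palk.length →
    (∀ j : Nat, j < palk.length → palk.getD j 0 ≤ palk.getD i 0) → i < inimesed.length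

instance (palk : List Int) (inimesed : List String) : Decidable (Pre_maksimum palk inimesed) := by
  unfold Pre_maksimum; infer_instance

def pvWitness_maksimum : List Int × List String := ([3, 7, 7, 1], ["a", "b", "c", "d"])

def Spec_maksimum (palk : List Int) (inimesed : List String) (out : List Int × List String) : Prop := out = maksimum_alt palk inimesed
instance (palk : List Int) (inimesed : List String) (out : List Int × List String) : Decidable (Spec_maksimum palk inimesed out) := by unfold Spec_maksimum; infer_instance

-- ===== CLAIM (what is proved, stated in full; the proofs are below) =====
def Claim_equal_maksimum : Prop := ∀ (palk : List Int) (inimesed : List String), Dom_maksimum palk inimesed → Pre_maksimum palk inimesed → Spec_maksimum palk inimesed (maksimum palk inimesed)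

-- ===== LEMMAS AND PROOFS =====

theorem le_foldl_max (l : List Int) (a : Int) : a ≤ l.foldl max a := by
  induction l generalizing a with
  | nil => simp
  | cons x t ih => exact le_trans (le_max_left a x) (ih _)

theorem mem_le_foldl_max (l : List Int) (a x : Int) (hx : x ∈ l) : x ≤ l.foldl max a := by
  induction l generalizing a with
  | nil => simp at hx
  | cons y t ih =>
    rcases List.mem_cons.1 hx with h | h
    · subst h; exact le_trans (le_max_right a x) (le_foldl_max _ _)
    · exact ih _ h

theorem foldl_max_le (l : List Int) (a c : Int) (ha : a ≤ c) (hl : ∀ x ∈ l, x ≤ c) :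
    l.foldl max a ≤ c := by
  induction l generalizing a with
  | nil => simpa
  | cons y t ih =>
    exact ih _ (max_le ha (hl y (List.mem_cons_self))) (fun x hx => hl x (List.mem_cons_of_mem _ hx))

theorem foldl_max_mem (l : List Int) (a : Int) : l.foldl max a = a ∨ l.foldl max a ∈ l := by
  induction l generalizing a with
  | nil => left; rfl
  | cons y t ih =>
    rcases ih (max a y) with h | h
    · rcases max_choice a y with h' | h'
      · left; simpa [h'] using h
      · right; simp [List.foldl_cons] at h ⊢; left; rw [h, h']
    · right; exact List.mem_cons_of_mem _ h

-- A's first loop: the snd component never influences the fst component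
theorem a_fold_fst (l : List Int) (xs : List Int) (ys : List String) (a : Int) (b : String) :
    (l.foldl (fun (st : Int × String) p =>
      if p > st.1 then
        (p, PySem.List.pyGetD ys (((PySem.List.index? xs p).getD 0 : Nat) : Int) "")
      else st) (a, b)).1 = l.foldl max a := by
  induction l generalizing a b with
  | nil => rfl
  | cons y t ih =>
    simp only [List.foldl_cons]
    by_cases h : y > a
    · rw [if_pos h, ih, max_eq_right (le_of_lt h)]
    · rw [if_neg h, ih, max_eq_left (le_of_not_gt h)]

-- B's fold: fst projection is a foldl max over the salaries of the zipped pairs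
theorem b_fold_fst (l : List (Int × String)) (a : Int) (d : PySem.Dict Int (List String)) :
    (l.foldl (fun (st : Int × PySem.Dict Int (List String)) pn =>
        ((if pn.1 > st.1 then pn.1 else st.1),
         st.2.modify pn.1 [] (fun s => s ++ [pn.2]))) (a, d)).1
      = (l.map Prod.fst).foldl max a := by
  induction l generalizing a d with
  | nil => rfl
  | cons y t ih =>
    simp only [List.foldl_cons, List.map_cons]
    rw [ih]
    by_cases h : y.1 > a
    · rw [if_pos h, max_eq_right (le_of_lt h)]
    · rw [if_neg h, max_eq_left (le_of_not_gt h)]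

-- B's fold: snd projection ignores the fst component
theorem b_fold_snd (l : List (Int × String)) (a : Int) (d : PySem.Dict Int (List String)) :
    (l.foldl (fun (st : Int × PySem.Dict Int (List String)) pn =>
        ((if pn.1 > st.1 then pn.1 else st.1),
         st.2.modify pn.1 [] (fun s => s ++ [pn.2]))) (a, d)).2
      = l.foldl (fun d pn => d.modify pn.1 [] (fun s => s ++ [pn.2])) d := by
  induction l generalizing a d with
  | nil => rfl
  | cons y t ih => simp only [List.foldl_cons]; exact ih _ _

-- the grouping dict, looked up at v, is the names of pairs with salary v in order
theorem dict_fold_getD (l : List (Int × String)) (d : PySem.Dict Int (List String)) (v : Int) :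
    (l.foldl (fun d pn => d.modify pn.1 [] (fun s => s ++ [pn.2])) d).getD v []
      = d.getD v [] ++ (l.filter (fun pn => pn.1 == v)).map Prod.snd := by
  induction l generalizing d with
  | nil => simp
  | cons y t ih =>
    simp only [List.foldl_cons, List.filter_cons]
    rw [ih]
    by_cases h : y.1 = v
    · simp [h]
    · have hne : v ≠ y.1 := fun hv => h hv.symm
      have : (y.1 == v) = false := by simpa using h
      simp [this, PySem.Dict.getD_modify, hne]

theorem map_fst_zip' (xs : List Int) (ys : List String) :
    (xs.zip ys).map Prod.fst = xs.take (min xs.length ys.length) := by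
  induction xs generalizing ys with
  | nil => simp
  | cons x t ih =>
    cases ys with
    | nil => simp
    | cons y u => simp [List.zip_cons_cons, ih, Nat.succ_min_succ]

theorem count_take_occ (xs : List Int) (K : Nat) (m : Int)
    (h : ∀ i : Nat, (hi : i < xs.length) → xs[i] = m → i < K) :
    (xs.take K).count m = xs.count m := by
  conv_rhs => rw [← List.take_append_drop K xs]
  rw [List.count_append]
  have hz : List.count m (xs.drop K) = 0 := by
    refine List.count_eq_zero.2 (fun hmem => ?_)
    obtain ⟨i, hi, hgi⟩ := List.mem_iff_getElem.1 hmem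
    have hlen : K + i < xs.length := by
      have := hi; simp [List.length_drop] at this; omega
    have : xs[K + i] = m := by rw [← List.getElem_drop]; exact hgi
    have := h (K + i) hlen this
    omega
  omega

theorem pop_spec (m : Int) : ∀ (k : Nat) (xs : List Int) (ys : List String)
    (acc1 : List Int) (acc2 : List String),
    xs.count m = k →
    (∀ i : Nat, (hi : i < xs.length) → xs[i] = m → i < ys.length) →
    maksimumPop m k xs ys acc1 acc2
      = (acc1 ++ List.replicate k m,
         acc2 ++ ((xs.zip ys).filter (fun pn => pn.1 == m)).map Prod.snd) := by
  intro k
  induction k with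
  | zero =>
    intro xs ys acc1 acc2 hc _
    have hm : m ∉ xs := List.count_eq_zero.1 hc
    have hfil : (xs.zip ys).filter (fun pn => pn.1 == m) = [] := by
      refine List.filter_eq_nil_iff.2 ?_
      rintro ⟨a, b⟩ hab hba
      have ham : a = m := by simpa using hba
      exact hm (ham ▸ (List.of_mem_zip hab).1)
    simp [maksimumPop, hfil]
  | succ k ih =>
    intro xs ys acc1 acc2 hc hidx
    have hmem : m ∈ xs := List.count_pos_iff.1 (by omega)
    obtain ⟨j, hj⟩ := Option.isSome_iff_exists.1 ((PySem.List.index?_isSome_iff xs m).2 hmem)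
    obtain ⟨hjlt, hxj, hfirst⟩ := PySem.List.getElem_of_index?_eq_some hj
    have hjy : j < ys.length := hidx j hjlt hxj
    -- the one step of the loop
    have hstep : maksimumPop m (k + 1) xs ys acc1 acc2
        = maksimumPop m k (xs.eraseIdx j) (ys.eraseIdx j)
            (acc1 ++ [xs[j]]) (acc2 ++ [ys[j]]) := by
      simp only [maksimumPop, hj, Option.getD_some,
        PySem.List.pop?_natCast xs j hjlt, PySem.List.pop?_natCast ys j hjy]
    -- counting: no occurrence of m before j
    have hctake : List.count m (xs.take j) = 0 := by
      refine List.count_eq_zero.2 (fun hmem' => ?_)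
      obtain ⟨i, hi, hgi⟩ := List.mem_iff_getElem.1 hmem'
      have hij : i < j := by simpa using lt_of_lt_of_le hi (by simp [List.length_take])
      exact hfirst i hij (by rw [← List.getElem_take (h := hi)]; exact hgi)
    have hxsplit : xs = xs.take j ++ xs[j] :: xs.drop (j + 1) := by
      conv_lhs => rw [← List.take_append_drop j xs, List.drop_eq_getElem_cons hjlt]
    have hcerase : (xs.eraseIdx j).count m = k := by
      have h1 : xs.count m = List.count m (xs.take j) + (1 + List.count m (xs.drop (j + 1))) := by
        conv_lhs => rw [hxsplit]
        rw [List.count_append, List.count_cons]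
        simp [hxj]
        omega
      rw [List.eraseIdx_eq_take_drop_succ, List.count_append]
      omega
    -- index condition is preserved
    have hidx' : ∀ i : Nat, (hi : i < (xs.eraseIdx j).length) →
        (xs.eraseIdx j)[i] = m → i < (ys.eraseIdx j).length := by
      intro i hi hgi
      rw [List.getElem_eraseIdx] at hgi
      have hylen : (ys.eraseIdx j).length = ys.length - 1 := by
        simp [List.length_eraseIdx, hjy]
      by_cases hij : i < j
      · exact absurd (by simpa [hij] using hgi) (hfirst i hij)
      · have hxlen : (xs.eraseIdx j).length = xs.length - 1 := by
          simp [List.length_eraseIdx, hjlt]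
        have h2 : xs[i + 1] = m := by simpa [hij] using hgi
        have := hidx (i + 1) (by omega) h2
        omega
    -- splitting the zip at index j
    have hlt : (xs.take j).length = (ys.take j).length := by
      simp [List.length_take]; omega
    have hzip : xs.zip ys = (xs.take j).zip (ys.take j)
        ++ (xs[j], ys[j]) :: (xs.drop (j + 1)).zip (ys.drop (j + 1)) := by
      conv_lhs => rw [← List.take_append_drop j xs, ← List.take_append_drop j ys]
      rw [List.zip_append hlt, List.drop_eq_getElem_cons hjlt, List.drop_eq_getElem_cons hjy,
        List.zip_cons_cons]
    have hzip' : (xs.eraseIdx j).zip (ys.eraseIdx j)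
        = (xs.take j).zip (ys.take j) ++ (xs.drop (j + 1)).zip (ys.drop (j + 1)) := by
      rw [List.eraseIdx_eq_take_drop_succ, List.eraseIdx_eq_take_drop_succ, List.zip_append hlt]
    have hfil : ((xs.take j).zip (ys.take j)).filter (fun pn => pn.1 == m) = [] := by
      refine List.filter_eq_nil_iff.2 ?_
      rintro ⟨a, b⟩ hab hba
      have ha : a ∈ xs.take j := (List.of_mem_zip hab).1
      obtain ⟨i, hi, hgi⟩ := List.mem_iff_getElem.1 ha
      have hij : i < j := by simpa using lt_of_lt_of_le hi (by simp [List.length_take])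
      have ham : a = m := beq_iff_eq.1 (by simpa using hba)
      exact hfirst i hij (by rw [← List.getElem_take (h := hi)]; rw [hgi, ham])
    rw [hstep, ih _ _ _ _ hcerase hidx', hzip, hzip']
    simp [List.filter_append, hfil, hxj, List.replicate_succ]

-- ===== VERDICT (by name: the statement is the Claim_ definition above) =====
theorem maksimum_spec : Claim_equal_maksimum := by
  intro palk inimesed _ hpre
  obtain ⟨hpne, hyne, hmax⟩ := hpre
  unfold Spec_maksimum
  obtain ⟨p0, pt, rfl⟩ : ∃ p0 pt, palk = p0 :: pt := by
    cases palk with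
    | nil => exact absurd rfl hpne
    | cons a t => exact ⟨a, t, rfl⟩
  set xs : List Int := p0 :: pt with hxs
  set m : Int := xs.foldl max p0 with hm
  have hub : ∀ x ∈ xs, x ≤ m := fun x hx => mem_le_foldl_max xs p0 x hx
  have hmem : m ∈ xs := by
    rcases foldl_max_mem xs p0 with h | h
    · rw [hm, h]; exact List.mem_cons_self
    · exact h
  have hidx : ∀ i : Nat, (hi : i < xs.length) → xs[i] = m → i < inimesed.length := by
    intro i hi hgi
    refine hmax i hi ?_
    intro j hj
    rw [List.getD_eq_getElem _ _ hj, List.getD_eq_getElem _ _ hi, hgi]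
    exact hub _ (List.getElem_mem hj)
  set K : Nat := min xs.length inimesed.length with hK
  set S : List String := ((xs.zip inimesed).filter (fun pn => pn.1 == m)).map Prod.snd with hS
  -- side A
  have hA : maksimum xs inimesed = ([] ++ List.replicate (List.count m xs) m, [] ++ S) := by
    unfold maksimum
    simp only [hxs, PySem.List.pyGetD_zero_cons]
    rw [a_fold_fst xs xs inimesed p0 (PySem.List.pyGetD inimesed 0 "")]
    rw [← hxs, ← hm, PySem.List.count_eq]
    exact pop_spec m (List.count m xs) xs inimesed [] [] rfl hidx
  -- side B: the running maximum over the zipped prefix equals the full maximum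
  have hpre_max : ((xs.zip inimesed).map Prod.fst).foldl max p0 = m := by
    rw [map_fst_zip', ← hK]
    have hKle : K ≤ xs.length := by omega
    refine le_antisymm ?_ ?_
    · exact foldl_max_le _ p0 m (hub p0 List.mem_cons_self)
        (fun x hx => hub x (List.mem_of_mem_take hx))
    · obtain ⟨i, hi, hgi⟩ := List.mem_iff_getElem.1 hmem
      have hiK : i < K := by have := hidx i hi hgi; omega
      have hmt : m ∈ xs.take K := by
        refine List.mem_iff_getElem.2 ⟨i, ?_, ?_⟩
        · simp [List.length_take]; exact ⟨hiK, hi⟩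
        · rw [List.getElem_take]; exact hgi
      exact mem_le_foldl_max _ p0 m hmt
  have hB : maksimum_alt xs inimesed = (List.replicate S.length m, S) := by
    unfold maksimum_alt
    simp only [hxs, PySem.List.pyGetD_zero_cons]
    rw [b_fold_fst, b_fold_snd, ← hxs, hpre_max, dict_fold_getD, PySem.Dict.getD_empty]
    simp [hS]
  -- the two lengths agree
  have hcount : S.length = List.count m xs := by
    have h1 : S.length = List.count m ((xs.zip inimesed).map Prod.fst) := by
      rw [hS, List.length_map, ← List.countP_eq_length_filter, List.count_eq_countP,
        List.countP_map]
      rfl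
    rw [h1, map_fst_zip', ← hK]
    exact count_take_occ xs K m (fun i hi hgi => by have := hidx i hi hgi; omega)
  rw [hA, hB, hcount]
  simp
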